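-- pv_equiv track=rewrite | github.com/afarabi97/hellogit | web/backend/app/service/scale_service.py | parse_nodes
-- ===== SOURCE A (Python) =====
-- def parse_nodes(nodes):
--     mdi = 0
--     master = 0
--     data = 0
--     coordinating_ingest = 0
--
--     if nodes is not None:
--         for node in nodes:
--             role = node["node.role"]
--             if "m" in role and "d" in role and "i" in role:
--                 mdi += 1
--             else:
--                 if "m" in role:
--                     master += 1
--                 if "d" in role:
--                     data += 1
--                 if "i" in role:
--                     coordinating_ingest += 1
--         # if data is zero than we are working with an mdi cluster
--         if master == 0 and data == 0:
--             master = mdi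
--
--     return { "master": master, "data": data, "coordinating": coordinating_ingest}
-- ===== SOURCE B (Python) =====
-- def parse_nodes(nodes):
--     roles = [node["node.role"] for node in (nodes or [])]
--     cm = sum(1 for r in roles if "m" in r)
--     cd = sum(1 for r in roles if "d" in r)
--     ci = sum(1 for r in roles if "i" in r)
--     cmdi = sum(1 for r in roles if "m" in r and "d" in r and "i" in r)
--     master, data, coordinating = cm - cmdi, cd - cmdi, ci - cmdi
--     if master == 0 and data == 0:
--         master = cmdi
--     return {"master": master, "data": data, "coordinating": coordinating}
-- ===== Notes on version B (the rewrite author's own statement) =====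
-- stated objective: alternative
-- what changed: Replaces the single stateful loop with four independent substring-count tallies (roles with m, d, i, and all three) and derives the buckets arithmetically (master = cm - cmdi, etc.) before the same zero-master/data fix-up.
import Mathlib
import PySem

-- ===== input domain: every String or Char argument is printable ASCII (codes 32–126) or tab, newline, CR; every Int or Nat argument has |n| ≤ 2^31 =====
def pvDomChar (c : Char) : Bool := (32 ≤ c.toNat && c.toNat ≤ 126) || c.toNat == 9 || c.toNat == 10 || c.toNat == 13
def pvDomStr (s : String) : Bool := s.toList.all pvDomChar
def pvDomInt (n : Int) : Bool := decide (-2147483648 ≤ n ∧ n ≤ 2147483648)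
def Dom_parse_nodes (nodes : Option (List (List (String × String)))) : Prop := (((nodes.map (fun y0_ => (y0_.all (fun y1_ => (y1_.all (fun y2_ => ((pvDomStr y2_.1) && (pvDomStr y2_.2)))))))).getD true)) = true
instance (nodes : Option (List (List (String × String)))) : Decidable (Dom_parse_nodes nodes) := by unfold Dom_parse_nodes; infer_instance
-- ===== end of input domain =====

-- B replaces A's single stateful loop by four independent substring-count tallies
-- combined arithmetically (alternative decomposition, same cost).


-- role lookup: node["node.role"] (first match); "" is never reached under Pre_
def pvRole (node : List (String × String)) : String :=
  ((PySem.Dict.mk node).get? "node.role").getD ""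

-- ===== PORT A =====
def parse_nodes (nodes : Option (List (List (String × String)))) : List (String × Int) :=
  match nodes with
  | none => [("master", 0), ("data", 0), ("coordinating", 0)]
  | some ns =>
    let st : Int × Int × Int × Int := ns.foldl
      (fun st node =>
        let (mdi, master, data, ci) := st
        let role := pvRole node
        if PySem.Str.isIn "m" role && PySem.Str.isIn "d" role && PySem.Str.isIn "i" role then
          (mdi + 1, master, data, ci)
        else
          (mdi,
           (if PySem.Str.isIn "m" role then master + 1 else master),
           (if PySem.Str.isIn "d" role then data + 1 else data),
           (if PySem.Str.isIn "i" role then ci + 1 else ci)))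
      (0, 0, 0, 0)
    let (mdi, master, data, ci) := st
    let master := if master = 0 ∧ data = 0 then mdi else master
    [("master", master), ("data", data), ("coordinating", ci)]

-- ===== PORT B =====
def parse_nodes_alt (nodes : Option (List (List (String × String)))) : List (String × Int) :=
  let roles := (nodes.getD []).map pvRole
  let cm : Int := roles.countP (fun r => PySem.Str.isIn "m" r)
  let cd : Int := roles.countP (fun r => PySem.Str.isIn "d" r)
  let ci : Int := roles.countP (fun r => PySem.Str.isIn "i" r)
  let cmdi : Int := roles.countP (fun r => PySem.Str.isIn "m" r && PySem.Str.isIn "d" r && PySem.Str.isIn "i" r)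
  let master := cm - cmdi
  let data := cd - cmdi
  let coordinating := ci - cmdi
  let master := if master = 0 ∧ data = 0 then cmdi else master
  [("master", master), ("data", data), ("coordinating", coordinating)]

-- ===== PRECONDITION & SPEC =====
-- Pre_ excludes exactly the inputs where A raises KeyError: a node without the "node.role" key.
def Pre_parse_nodes (nodes : Option (List (List (String × String)))) : Prop :=
  ∀ node ∈ nodes.getD [], (PySem.Dict.mk node).contains "node.role" = true
instance (nodes : Option (List (List (String × String)))) : Decidable (Pre_parse_nodes nodes) := by unfold Pre_parse_nodes; infer_instance
def pvWitness_parse_nodes : (Option (List (List (String × String)))) := some [[("node.role", "mdi")], [("node.role", "m")]]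

def Spec_parse_nodes (nodes : Option (List (List (String × String)))) (out : List (String × Int)) : Prop := out = parse_nodes_alt nodes
instance (nodes : Option (List (List (String × String)))) (out : List (String × Int)) : Decidable (Spec_parse_nodes nodes out) := by unfold Spec_parse_nodes; infer_instance

-- ===== CLAIM (what is proved, stated in full; the proofs are below) =====
def Claim_equal_parse_nodes : Prop := ∀ (nodes : Option (List (List (String × String)))), Dom_parse_nodes nodes → Pre_parse_nodes nodes → Spec_parse_nodes nodes (parse_nodes nodes)

-- ===== LEMMAS AND PROOFS =====

def pvPm (node : List (String × String)) : Bool := PySem.Str.isIn "m" (pvRole node)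
def pvPd (node : List (String × String)) : Bool := PySem.Str.isIn "d" (pvRole node)
def pvPi (node : List (String × String)) : Bool := PySem.Str.isIn "i" (pvRole node)
def pvPmdi (node : List (String × String)) : Bool := pvPm node && pvPd node && pvPi node

-- A's fold adds, to any starting state, exactly the four counts over the list
theorem pvFoldA (ns : List (List (String × String))) :
    ∀ (s : Int × Int × Int × Int),
    ns.foldl
      (fun st node =>
        let (mdi, master, data, ci) := st
        let role := pvRole node
        if PySem.Str.isIn "m" role && PySem.Str.isIn "d" role && PySem.Str.isIn "i" role then
          (mdi + 1, master, data, ci)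
        else
          (mdi,
           (if PySem.Str.isIn "m" role then master + 1 else master),
           (if PySem.Str.isIn "d" role then data + 1 else data),
           (if PySem.Str.isIn "i" role then ci + 1 else ci))) s
    = (s.1 + ns.countP pvPmdi,
       s.2.1 + ns.countP (fun n => pvPm n && !pvPmdi n),
       s.2.2.1 + ns.countP (fun n => pvPd n && !pvPmdi n),
       s.2.2.2 + ns.countP (fun n => pvPi n && !pvPmdi n)) := by
  induction ns with
  | nil => intro s; simp
  | cons n t ih =>
    intro s
    obtain ⟨mdi, ma, da, ci⟩ := s
    simp only [List.foldl_cons]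
    by_cases hm : PySem.Str.isIn "m" (pvRole n) = true <;>
    by_cases hd : PySem.Str.isIn "d" (pvRole n) = true <;>
    by_cases hi : PySem.Str.isIn "i" (pvRole n) = true <;>
    · simp only [Bool.not_eq_true] at *
      simp only [hm, hd, hi, Bool.and_false, Bool.and_true, if_true, if_false,
        Bool.false_eq_true]
      rw [ih]
      simp only [List.countP_cons, pvPm, pvPd, pvPi, pvPmdi, hm, hd, hi, Bool.and_false,
        Bool.and_true, Bool.not_true, Bool.not_false, Bool.false_eq_true, if_true, if_false,
        Prod.mk.injEq]
      refine ⟨by push_cast; ring, by push_cast; ring, by push_cast; ring, by push_cast; ring⟩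

-- split a count along a stronger predicate
theorem pvCountSplit (p q : List (String × String) → Bool)
    (h : ∀ n, q n = true → p n = true) (l : List (List (String × String))) :
    l.countP p = l.countP q + l.countP (fun n => p n && !q n) := by
  induction l with
  | nil => simp
  | cons n t ih =>
    simp only [List.countP_cons]
    by_cases hq : q n = true
    · simp [hq, h n hq, ih]; omega
    · have hq2 : q n = false := by simpa using hq
      by_cases hp : p n = true <;> simp [hq2, hp, ih] <;> omega


-- ===== VERDICT (by name: the statement is the Claim_ definition above) =====
theorem parse_nodes_spec : Claim_equal_parse_nodes := by
  intro nodes _ _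
  unfold Spec_parse_nodes
  match nodes with
  | none => rfl
  | some ns =>
    have hm := pvCountSplit pvPm pvPmdi
      (fun n h => (Bool.and_eq_true _ _ |>.mp ((Bool.and_eq_true _ _ |>.mp h).1)).1) ns
    have hd := pvCountSplit pvPd pvPmdi
      (fun n h => (Bool.and_eq_true _ _ |>.mp ((Bool.and_eq_true _ _ |>.mp h).1)).2) ns
    have hi := pvCountSplit pvPi pvPmdi
      (fun n h => (Bool.and_eq_true _ _ |>.mp h).2) ns
    zify at hm hd hi
    simp only [parse_nodes, parse_nodes_alt, pvFoldA, Option.getD_some, List.countP_map,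
      Function.comp_def, zero_add]
    simp only [show pvPm = (fun n => PySem.Str.isIn "m" (pvRole n)) from rfl,
      show pvPd = (fun n => PySem.Str.isIn "d" (pvRole n)) from rfl,
      show pvPi = (fun n => PySem.Str.isIn "i" (pvRole n)) from rfl,
      show pvPmdi = (fun n => PySem.Str.isIn "m" (pvRole n) && PySem.Str.isIn "d" (pvRole n) && PySem.Str.isIn "i" (pvRole n)) from rfl] at hm hd hi ⊢
    rw [hm, hd, hi]
    ring_nf
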